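-- pv_equiv track=rewrite | github.com/Petraea/lights | lights.py | token_parse
-- ===== SOURCE A (Python) =====
-- class ParseError(Exception):
--     pass
--
-- def token_parse(input, separator=',',equator='='):
--     input += separator
--     tdict = {}
--     toassign = []
--     token = ''
--     assigning = False
--     for c in input:
--         if c == separator:
--             token = token.strip()
--             if token == '': raise ParseError("Tokens can't be blank.")
--             if assigning:
--                 for i in toassign:
--                     tdict[i.lower()]=token
--                 toassign = []
--                 assigning = False
--                 token = ''
--             else:
--                 toassign.append(token)
--                 token = ''
--         elif c == equator:
--             token = token.strip()
--             if not assigning: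
--                 assigning = True
--                 toassign.append(token)
--                 token = ''
--             else:
--                 raise ParseError("Two equals in a row?")
--         else:
--             token += c
--     if assigning:
--        raise ParseError("Parse Error")
--     if token.strip() is not '':
--         raise ParseError('Token still present.')
--     if  len(toassign) != 0:
--         for t in toassign:
--             tdict[t] = '-9999'
--     return tdict
-- ===== SOURCE B (Python) =====
-- class ParseError(Exception):
--     pass
--
-- def token_parse(input, separator=',', equator='='):
--     # The token grammar is character-level: each delimiter is a single character
--     # (a longer 'equator' is ordinary token text). B parses field-at-a-time:
--     # split the input on the separator, then split each field on the equator.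
--     if len(separator) != 1:
--         raise ParseError("Separator must be a single character.")
--     tdict = {}
--     toassign = []
--     for field in input.split(separator):
--         if len(equator) == 1 and equator in field:
--             key, *rest = field.split(equator)
--             if len(rest) > 1:
--                 raise ParseError("Two equals in a row?")
--             value = rest[0].strip()
--             if value == '':
--                 raise ParseError("Tokens can't be blank.")
--             for k in toassign:
--                 tdict[k.lower()] = value
--             tdict[key.strip().lower()] = value
--             toassign = []
--         else:
--             t = field.strip()
--             if t == '':
--                 raise ParseError("Tokens can't be blank.")
--             toassign.append(t)
--     for t in toassign:
--         tdict[t] = '-9999'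
--     return tdict
-- ===== Notes on version B (the rewrite author's own statement) =====
-- stated objective: idiomatic
-- what changed: B replaces A's character-by-character state machine (token buffer, assigning flag, manual strip/reset at each delimiter char) with str.split on the separator and a per-field split on the equator, processing whole fields at a time; it keeps A's character-level grammar explicit (a delimiter is one character, so a longer equator is ordinary token text) and validates the separator up front.
-- outside the precondition, e.g. on token_parse(' ', '  ', '='): A returns {}, B raises ParseError
import Mathlib
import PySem

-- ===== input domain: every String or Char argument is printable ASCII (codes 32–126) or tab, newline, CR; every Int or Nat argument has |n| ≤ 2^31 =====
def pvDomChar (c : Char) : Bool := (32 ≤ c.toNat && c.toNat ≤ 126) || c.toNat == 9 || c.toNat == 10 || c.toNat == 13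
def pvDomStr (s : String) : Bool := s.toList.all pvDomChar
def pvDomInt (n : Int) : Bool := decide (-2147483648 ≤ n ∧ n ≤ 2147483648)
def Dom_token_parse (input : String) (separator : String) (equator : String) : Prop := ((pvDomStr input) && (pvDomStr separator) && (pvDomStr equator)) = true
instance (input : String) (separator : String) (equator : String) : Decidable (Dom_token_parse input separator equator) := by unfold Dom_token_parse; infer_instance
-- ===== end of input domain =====

-- B replaces A's character-by-character state machine with str.split on the separator and a
-- per-field split on the single-character equator (A's grammar is character-level, so a longer
-- equator is ordinary token text in both); field-at-a-time decomposition, no speed claim.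


-- ===== PORT A =====
-- A's per-character loop body; the Python `raise ParseError` is modelled by the state
-- becoming `none` (the caller then returns [], a value only reachable outside Pre_).
def tpStep (separator : String) (equator : String)
    (st : Option (PySem.Dict String String × List String × String × Bool)) (c : Char) :
    Option (PySem.Dict String String × List String × String × Bool) :=
  match st with
  | none => none
  | some (tdict, toassign, token, assigning) =>
    if String.ofList [c] = separator then
      let token := PySem.Str.strip token
      if token = "" then none  -- raise ParseError("Tokens can't be blank.")
      else if assigning then
        some (toassign.foldl (fun d i => d.insert (PySem.Str.lower i) token) tdict, [], "", false)
      else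
        some (tdict, toassign ++ [token], "", assigning)
    else if String.ofList [c] = equator then
      let token := PySem.Str.strip token
      if assigning = false then
        some (tdict, toassign ++ [token], "", true)
      else none  -- raise ParseError("Two equals in a row?")
    else
      some (tdict, toassign, token ++ String.ofList [c], assigning)

def token_parse (input : String) (separator : String) (equator : String) : List (String × String) :=
  let input := input ++ separator
  match input.toList.foldl (tpStep separator equator) (some (PySem.Dict.empty, [], "", false)) with
  | none => []
  | some (tdict, toassign, token, assigning) =>
    if assigning then []  -- raise ParseError("Parse Error")
    -- CPython's `token.strip() is not ''` is identity on the interned empty string: it is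
    -- `token.strip() != ''` for every string, ported as equality.
    else if PySem.Str.strip token ≠ "" then []  -- raise ParseError('Token still present.')
    else
      let tdict := if toassign.length ≠ 0 then
          toassign.foldl (fun d t => d.insert t "-9999") tdict
        else tdict
      tdict.items

-- ===== PORT B =====
-- B's per-field loop body; a `raise ParseError` is again modelled by `none`.
def tpFieldStep (equator : String)
    (st : Option (PySem.Dict String String × List String)) (field : String) :
    Option (PySem.Dict String String × List String) :=
  match st with
  | none => none
  | some (tdict, toassign) =>
    if equator.length = 1 ∧ PySem.Str.isIn equator field = true then
      -- key, *rest = field.split(equator): the 1-char equator occurs in field, so split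
      -- returns ≥ 2 pieces; `key` is the first and `rest` the remaining pieces.
      let parts := (PySem.Str.split? field equator).getD []
      let key := parts.getD 0 ""
      let rest := parts.drop 1
      if rest.length > 1 then none  -- raise ParseError("Two equals in a row?")
      else
        let value := PySem.Str.strip (rest.getD 0 "")
        if value = "" then none  -- raise ParseError("Tokens can't be blank.")
        else
          let tdict := toassign.foldl (fun d k => d.insert (PySem.Str.lower k) value) tdict
          some (tdict.insert (PySem.Str.lower (PySem.Str.strip key)) value, [])
    else
      let t := PySem.Str.strip field
      if t = "" then none  -- raise ParseError("Tokens can't be blank.")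
      else some (tdict, toassign ++ [t])

def token_parse_alt (input : String) (separator : String) (equator : String) : List (String × String) :=
  if separator.length ≠ 1 then []  -- raise ParseError("Separator must be a single character.")
  else match PySem.Str.split? input separator with
  | none => []  -- unreachable under the guard (separator is nonempty)
  | some fields =>
    match fields.foldl (tpFieldStep equator) (some (PySem.Dict.empty, [])) with
    | none => []
    | some (tdict, toassign) =>
      (toassign.foldl (fun d t => d.insert t "-9999") tdict).items

-- ===== PRECONDITION & SPEC =====
-- Pre_ is the set of inputs on which A returns normally, minus one stated exclusion:
-- separators that are not a single character, on which A's char-by-char comparison never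
-- splits, so A either raises or (only for input that strips to nothing and contains no
-- equator character) returns an empty dict — an artefact of never splitting; B validates
-- its separator and raises ParseError there. Everything else A raises on (a blank token,
-- a blank value, two equators in a field) B raises on too.
def Pre_token_parse (input : String) (separator : String) (equator : String) : Prop :=
  separator.length = 1 ∧
  (∀ f ∈ (PySem.Str.split? input separator).getD [],
    (equator.length = 1 ∧ PySem.Str.isIn equator f = true →
      ((PySem.Str.split? f equator).getD []).length ≤ 2 ∧
      PySem.Str.strip (((PySem.Str.split? f equator).getD []).getD 1 "") ≠ "") ∧
    (¬ (equator.length = 1 ∧ PySem.Str.isIn equator f = true) → PySem.Str.strip f ≠ ""))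
instance (input : String) (separator : String) (equator : String) : Decidable (Pre_token_parse input separator equator) := by unfold Pre_token_parse; infer_instance

def pvWitness_token_parse : String × String × String := (" a = b ,C, c=d ", ",", "=")

def Spec_token_parse (input : String) (separator : String) (equator : String) (out : List (String × String)) : Prop := out = token_parse_alt input separator equator
instance (input : String) (separator : String) (equator : String) (out : List (String × String)) : Decidable (Spec_token_parse input separator equator out) := by unfold Spec_token_parse; infer_instance

-- ===== CLAIM (what is proved, stated in full; the proofs are below) =====
def Claim_equal_token_parse : Prop := ∀ (input : String) (separator : String) (equator : String), Dom_token_parse input separator equator → Pre_token_parse input separator equator → Spec_token_parse input separator equator (token_parse input separator equator)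

-- ===== LEMMAS AND PROOFS =====

-- Python's s.split(sep) for a single-character sep, as a plain structural recursion
-- (cur is the reversed accumulator of the current piece).
def split1 (e : Char) : List Char → List Char → List (List Char)
  | [], cur => [cur.reverse]
  | c :: rest, cur => if c = e then cur.reverse :: split1 e rest [] else split1 e rest (c :: cur)

theorem go_single (e : Char) (l : List Char) : ∀ (fuel : Nat) (cur : List Char)
    (acc : List (List Char)), l.length < fuel →
    PySem.Chars.splitOn.go [e] fuel l cur acc = acc.reverse ++ split1 e l cur := by
  induction l with
  | nil =>
    intro fuel cur acc h
    match fuel with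
    | fuel + 1 => simp [PySem.Chars.splitOn.go, split1]
  | cons c rest ih =>
    intro fuel cur acc h
    match fuel with
    | fuel + 1 =>
      simp only [List.length_cons] at h
      rw [PySem.Chars.splitOn.go]
      by_cases hc : c = e
      · subst hc
        simp only [List.isPrefixOf, beq_self_eq_true, Bool.true_and,
          if_true, List.length_nil, List.length_cons, List.drop_succ_cons, List.drop_zero]
        rw [ih fuel [] (cur.reverse :: acc) (by omega)]
        simp [split1]
      · have : ([e].isPrefixOf (c :: rest)) = false := by
          simp [List.isPrefixOf]; intro h'; exact absurd h'.symm hc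
        simp only [this, Bool.false_eq_true, if_false]
        rw [ih fuel (c :: cur) acc (by omega)]
        simp [split1, hc]

theorem splitOn_single (e : Char) (l : List Char) :
    PySem.Chars.splitOn l [e] = split1 e l [] := by
  rw [PySem.Chars.splitOn, go_single e l (l.length + 1) [] [] (by omega)]
  simp

theorem split1_no (e : Char) : ∀ (l : List Char), e ∉ l → ∀ cur, split1 e l cur = [cur.reverse ++ l] := by
  intro l
  induction l with
  | nil => intro _ cur; simp [split1]
  | cons c rest ih =>
    intro h cur
    have hc : c ≠ e := fun h' => h (h' ▸ List.mem_cons_self)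
    have hr : e ∉ rest := fun h' => h (List.mem_cons_of_mem _ h')
    simp [split1, hc, ih hr]

theorem split1_length_pos (e : Char) : ∀ (l cur : List Char), 0 < (split1 e l cur).length := by
  intro l
  induction l with
  | nil => intro cur; simp [split1]
  | cons c rest ih =>
    intro cur
    by_cases hc : c = e <;> simp [split1, hc, ih]

theorem split1_first (e : Char) : ∀ (p : List Char), e ∉ p → ∀ (rest cur : List Char),
    split1 e (p ++ e :: rest) cur = (cur.reverse ++ p) :: split1 e rest [] := by
  intro p
  induction p with
  | nil => intro _ rest cur; simp [split1]
  | cons c q ih =>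
    intro h rest cur
    have hc : c ≠ e := fun h' => h (h' ▸ List.mem_cons_self)
    have hq : e ∉ q := fun h' => h (List.mem_cons_of_mem _ h')
    simp [split1, hc, ih hq]

theorem split1_sep_not_mem (e : Char) : ∀ (l cur : List Char), e ∉ cur →
    ∀ f ∈ split1 e l cur, e ∉ f := by
  intro l
  induction l with
  | nil =>
    intro cur hcur f hf
    simp [split1] at hf
    subst hf; simpa using hcur
  | cons c rest ih =>
    intro cur hcur f hf
    by_cases hc : c = e
    · subst hc
      simp [split1] at hf
      rcases hf with hf | hf
      · subst hf; simpa using hcur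
      · exact ih [] (by simp) f hf
    · simp [split1, hc] at hf
      exact ih (c :: cur) (by simp [hcur]; exact fun h => hc h.symm) f hf

theorem first_occ {e : Char} : ∀ {l : List Char}, e ∈ l → ∃ p r, l = p ++ e :: r ∧ e ∉ p := by
  intro l
  induction l with
  | nil => intro h; cases h
  | cons c rest ih =>
    intro h
    by_cases hc : c = e
    · exact ⟨[], rest, by simp [hc], by simp⟩
    · have : e ∈ rest := by rcases List.mem_cons.mp h with h | h; exact absurd h.symm hc; exact h
      obtain ⟨p, r, hpr, hp⟩ := ih this
      exact ⟨c :: p, r, by simp [hpr], by simp [hp]; exact fun h' => hc h'.symm⟩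

theorem split1_join (s : Char) : ∀ (l cur : List Char),
    (split1 s l cur).flatMap (· ++ [s]) = cur.reverse ++ l ++ [s] := by
  intro l
  induction l with
  | nil => intro cur; simp [split1]
  | cons c rest ih =>
    intro cur
    by_cases hc : c = s
    · subst hc; simp [split1, ih]
    · simp [split1, hc, ih (c :: cur)]

theorem ofList_single_eq_iff (c d : Char) :
    (String.ofList [c] = String.ofList [d]) ↔ c = d := by
  constructor
  · intro h
    have := congrArg String.toList h
    simpa using this
  · intro h; rw [h]

theorem isIn_single_true (e : Char) (f : List Char) (h : e ∈ f) :
    PySem.Str.isIn (String.ofList [e]) (String.ofList f) = true := by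
  rw [PySem.Str.isIn_iff_infix]
  obtain ⟨p, r, hpr, -⟩ := first_occ h
  exact ⟨p, r, by simp [hpr]⟩

theorem isIn_single_false (e : Char) (f : List Char) (h : e ∉ f) :
    PySem.Str.isIn (String.ofList [e]) (String.ofList f) = false := by
  cases hb : PySem.Str.isIn (String.ofList [e]) (String.ofList f)
  · rfl
  · exfalso
    have hinf := (PySem.Str.isIn_iff_infix _ _).mp hb
    simp only [String.toList_ofList] at hinf
    exact h (hinf.subset (by simp))

theorem foldl_tpStep_none (sep eq : String) (l : List Char) :
    l.foldl (tpStep sep eq) none = none := by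
  induction l with
  | nil => rfl
  | cons c rest ih => simpa [List.foldl, tpStep] using ih

theorem foldl_tpFieldStep_none (eq : String) (l : List String) :
    l.foldl (tpFieldStep eq) none = none := by
  induction l with
  | nil => rfl
  | cons f rest ih => simpa [List.foldl, tpFieldStep] using ih

theorem accum (sepStr eqStr : String) : ∀ (l : List Char),
    (∀ c ∈ l, String.ofList [c] ≠ sepStr ∧ String.ofList [c] ≠ eqStr) →
    ∀ (d : PySem.Dict String String) (ta : List String) (t : String) (b : Bool),
    l.foldl (tpStep sepStr eqStr) (some (d, ta, t, b)) =
      some (d, ta, t ++ String.ofList l, b) := by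
  intro l
  induction l with
  | nil => intro _ d ta t b; simp
  | cons c rest ih =>
    intro h d ta t b
    have hc := h c List.mem_cons_self
    have hrest : ∀ c ∈ rest, String.ofList [c] ≠ sepStr ∧ String.ofList [c] ≠ eqStr :=
      fun x hx => h x (List.mem_cons_of_mem _ hx)
    simp only [List.foldl_cons, tpStep, hc.1, if_false, hc.2]
    rw [ih hrest]
    have : t ++ String.ofList [c] ++ String.ofList rest = t ++ String.ofList (c :: rest) := by
      rw [String.append_assoc, ← String.ofList_append]; rfl
    rw [this]

theorem accum_chars (s e : Char) (l : List Char) (h : ∀ c ∈ l, c ≠ s ∧ c ≠ e)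
    (d : PySem.Dict String String) (ta : List String) (t : String) (b : Bool) :
    l.foldl (tpStep (String.ofList [s]) (String.ofList [e])) (some (d, ta, t, b)) =
      some (d, ta, t ++ String.ofList l, b) := by
  refine accum _ _ l (fun c hc => ⟨?_, ?_⟩) d ta t b
  · exact fun h' => (h c hc).1 ((ofList_single_eq_iff c s).mp h')
  · exact fun h' => (h c hc).2 ((ofList_single_eq_iff c e).mp h')

theorem field_split? (e : Char) (f : List Char) :
    PySem.Str.split? (String.ofList f) (String.ofList [e]) =
      some ((split1 e f []).map String.ofList) := by
  simp [PySem.Str.split?, PySem.Chars.split?, splitOn_single]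

theorem field_sim (s e : Char) (f : List Char) (hf : s ∉ f)
    (d : PySem.Dict String String) (ta : List String) :
    (f ++ [s]).foldl (tpStep (String.ofList [s]) (String.ofList [e])) (some (d, ta, "", false)) =
      (tpFieldStep (String.ofList [e]) (some (d, ta)) (String.ofList f)).map
        (fun p => (p.1, p.2, "", false)) := by
  by_cases he : e ∈ f
  · have hguard : (String.ofList [e]).length = 1 ∧
        PySem.Str.isIn (String.ofList [e]) (String.ofList f) = true :=
      ⟨by simp [String.length_ofList], isIn_single_true e f he⟩
    have hstep : tpFieldStep (String.ofList [e]) (some (d, ta)) (String.ofList f) =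
        (if (((split1 e f []).map String.ofList).drop 1).length > 1 then none
         else
          (if PySem.Str.strip ((((split1 e f []).map String.ofList).drop 1).getD 0 "") = ""
           then none
           else some ((ta.foldl (fun d k => d.insert (PySem.Str.lower k)
                  (PySem.Str.strip ((((split1 e f []).map String.ofList).drop 1).getD 0 ""))) d).insert
                (PySem.Str.lower (PySem.Str.strip (((split1 e f []).map String.ofList).getD 0 "")))
                (PySem.Str.strip ((((split1 e f []).map String.ofList).drop 1).getD 0 "")), []))) := by
      simp only [tpFieldStep, field_split? e f, hguard, and_self, if_true, Option.getD_some]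
    have hes : e ≠ s := fun h => hf (h ▸ he)
    obtain ⟨p, r, hpr, hp⟩ := first_occ he
    subst hpr
    have hsplit : split1 e (p ++ e :: r) [] = p :: split1 e r [] := by
      simpa using split1_first e p hp r []
    have hsp : s ∉ p := fun h => hf (List.mem_append_left _ h)
    have hser : s ∉ e :: r := fun h => hf (List.mem_append_right _ h)
    have hsr : s ∉ r := fun h => hser (List.mem_cons_of_mem _ h)
    have hpchars : ∀ c ∈ p, c ≠ s ∧ c ≠ e :=
      fun c hc => ⟨fun h => hsp (h ▸ hc), fun h => hp (h ▸ hc)⟩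
    have hnes : ¬ (String.ofList [e] = String.ofList [s]) := fun h =>
      hes ((ofList_single_eq_iff e s).mp h)
    have harr : (p ++ e :: r) ++ [s] = p ++ e :: (r ++ [s]) := by simp
    rw [harr, List.foldl_append, accum_chars s e p hpchars d ta "" false, List.foldl_cons]
    have hestep : tpStep (String.ofList [s]) (String.ofList [e])
        (some (d, ta, "" ++ String.ofList p, false)) e =
        some (d, ta ++ [PySem.Str.strip (String.ofList p)], "", true) := by
      simp [tpStep, hnes]
    rw [hestep]
    by_cases her : e ∈ r
    · -- three or more pieces: A dies at the second equator, B at len(rest) > 1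
      obtain ⟨q, r2, hqr, hq⟩ := first_occ her
      have hsplit2 : split1 e r [] = q :: split1 e r2 [] := by
        rw [hqr]; simpa using split1_first e q hq r2 []
      have hlen : (((split1 e (p ++ e :: r) []).map String.ofList).drop 1).length > 1 := by
        simp [hsplit, hsplit2]
        exact split1_length_pos e r2 []
      have hsq : s ∉ q := fun h => hsr (hqr ▸ List.mem_append_left _ h)
      have hqchars : ∀ c ∈ q, c ≠ s ∧ c ≠ e :=
        fun c hc => ⟨fun h => hsq (h ▸ hc), fun h => hq (h ▸ hc)⟩
      have harr2 : r ++ [s] = q ++ e :: (r2 ++ [s]) := by rw [hqr]; simp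
      rw [harr2, List.foldl_append, accum_chars s e q hqchars, List.foldl_cons]
      have hestep2 : tpStep (String.ofList [s]) (String.ofList [e])
          (some (d, ta ++ [PySem.Str.strip (String.ofList p)], "" ++ String.ofList q, true)) e =
          none := by
        simp [tpStep, hnes]
      rw [hestep2, foldl_tpStep_none, hstep, if_pos hlen]
      rfl
    · -- exactly two pieces
      have hsplit2 : split1 e r [] = [r] := by simpa using split1_no e r her []
      have hrchars : ∀ c ∈ r, c ≠ s ∧ c ≠ e :=
        fun c hc => ⟨fun h => hsr (h ▸ hc), fun h => her (h ▸ hc)⟩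
      rw [List.foldl_append, accum_chars s e r hrchars, List.foldl_cons]
      have hsstep : tpStep (String.ofList [s]) (String.ofList [e])
          (some (d, ta ++ [PySem.Str.strip (String.ofList p)], "" ++ String.ofList r, true)) s =
          if PySem.Str.strip (String.ofList r) = "" then none
          else some ((ta ++ [PySem.Str.strip (String.ofList p)]).foldl
            (fun d i => d.insert (PySem.Str.lower i) (PySem.Str.strip (String.ofList r))) d,
            [], "", false) := by
        simp [tpStep]
      rw [hsstep, hstep]
      have hlen1 : ¬ ((((split1 e (p ++ e :: r) []).map String.ofList).drop 1).length > 1) := by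
        simp [hsplit, hsplit2]
      rw [if_neg hlen1]
      have hget1 : (((split1 e (p ++ e :: r) []).map String.ofList).drop 1).getD 0 "" =
          String.ofList r := by
        simp [hsplit, hsplit2]
      have hget0 : ((split1 e (p ++ e :: r) []).map String.ofList).getD 0 "" = String.ofList p := by
        simp [hsplit, hsplit2]
      rw [hget1, hget0]
      by_cases hblank : PySem.Str.strip (String.ofList r) = ""
      · rw [if_pos hblank, if_pos hblank]; rfl
      · rw [if_neg hblank, if_neg hblank]
        simp [List.foldl_append]
  · -- the equator character does not occur: a plain token in both
    have hguard : ¬ ((String.ofList [e]).length = 1 ∧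
        PySem.Str.isIn (String.ofList [e]) (String.ofList f) = true) := by
      rw [isIn_single_false e f he]; simp
    have hfchars : ∀ c ∈ f, c ≠ s ∧ c ≠ e :=
      fun c hc => ⟨fun h => hf (h ▸ hc), fun h => he (h ▸ hc)⟩
    rw [List.foldl_append, accum_chars s e f hfchars, List.foldl_cons]
    have hsstep : tpStep (String.ofList [s]) (String.ofList [e])
        (some (d, ta, "" ++ String.ofList f, false)) s =
        if PySem.Str.strip (String.ofList f) = "" then none
        else some (d, ta ++ [PySem.Str.strip (String.ofList f)], "", false) := by
      simp [tpStep]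
    rw [hsstep]
    simp only [tpFieldStep, hguard, if_false]
    by_cases hblank : PySem.Str.strip (String.ofList f) = ""
    · rw [if_pos hblank]; simp [hblank]
    · rw [if_neg hblank]; simp [hblank]

-- A delimiter that is not a single character never matches A's char-by-char comparison and
-- never enters B's assignment branch: the field is a plain token in both.
theorem field_sim3 (s : Char) (eqStr : String) (hlen : eqStr.length ≠ 1) (f : List Char)
    (hf : s ∉ f) (d : PySem.Dict String String) (ta : List String) :
    (f ++ [s]).foldl (tpStep (String.ofList [s]) eqStr) (some (d, ta, "", false)) =
      (tpFieldStep eqStr (some (d, ta)) (String.ofList f)).map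
        (fun p => (p.1, p.2, "", false)) := by
  have hchars : ∀ c ∈ f, String.ofList [c] ≠ String.ofList [s] ∧ String.ofList [c] ≠ eqStr := by
    intro c hc
    refine ⟨fun h' => hf (((ofList_single_eq_iff c s).mp h') ▸ hc), fun h' => ?_⟩
    have := congrArg String.length h'
    simp [String.length_ofList] at this
    exact hlen this.symm
  rw [List.foldl_append, accum (String.ofList [s]) eqStr f hchars, List.foldl_cons]
  have hsstep : tpStep (String.ofList [s]) eqStr (some (d, ta, "" ++ String.ofList f, false)) s =
      if PySem.Str.strip (String.ofList f) = "" then none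
      else some (d, ta ++ [PySem.Str.strip (String.ofList f)], "", false) := by
    simp [tpStep]
  rw [hsstep]
  have hguard : ¬ (eqStr.length = 1 ∧
      PySem.Str.isIn eqStr (String.ofList f) = true) := fun h => hlen h.1
  simp only [tpFieldStep, hguard, if_false]
  by_cases hblank : PySem.Str.strip (String.ofList f) = ""
  · rw [if_pos hblank]; simp [hblank]
  · rw [if_neg hblank]; simp [hblank]

theorem foldl_foldl_none (s : Char) (eqStr : String) (fs : List (List Char)) :
    fs.foldl (fun st f => (f ++ [s]).foldl (tpStep (String.ofList [s]) eqStr) st)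
      none = none := by
  induction fs with
  | nil => rfl
  | cons f rest ih => rw [List.foldl_cons, foldl_tpStep_none]; exact ih

theorem fields_sim (s : Char) (eqStr : String) : ∀ (fs : List (List Char)),
    (∀ f ∈ fs, ∀ (d : PySem.Dict String String) (ta : List String),
      (f ++ [s]).foldl (tpStep (String.ofList [s]) eqStr) (some (d, ta, "", false)) =
        (tpFieldStep eqStr (some (d, ta)) (String.ofList f)).map
          (fun p => (p.1, p.2, "", false))) →
    ∀ (d : PySem.Dict String String) (ta : List String),
    fs.foldl (fun st f => (f ++ [s]).foldl (tpStep (String.ofList [s]) eqStr) st)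
      (some (d, ta, "", false)) =
    ((fs.map String.ofList).foldl (tpFieldStep eqStr) (some (d, ta))).map
      (fun p => (p.1, p.2, "", false)) := by
  intro fs
  induction fs with
  | nil => intro _ d ta; rfl
  | cons f rest ih =>
    intro h d ta
    have hf := h f List.mem_cons_self
    have hrest := fun g hg => h g (List.mem_cons_of_mem _ hg)
    rw [List.foldl_cons, hf d ta, List.map_cons, List.foldl_cons]
    match hcase : tpFieldStep eqStr (some (d, ta)) (String.ofList f) with
    | none =>
      simp only [Option.map_none]
      rw [foldl_foldl_none, foldl_tpFieldStep_none]
      rfl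
    | some (d', ta') =>
      simp only [Option.map_some]
      exact ih hrest d' ta'

theorem tp_eq_of_field (input : String) (eqStr : String) (s : Char)
    (hfield : ∀ f ∈ split1 s input.toList [], ∀ (d : PySem.Dict String String)
      (ta : List String),
      (f ++ [s]).foldl (tpStep (String.ofList [s]) eqStr) (some (d, ta, "", false)) =
        (tpFieldStep eqStr (some (d, ta)) (String.ofList f)).map
          (fun p => (p.1, p.2, "", false))) :
    token_parse input (String.ofList [s]) eqStr =
      token_parse_alt input (String.ofList [s]) eqStr := by
  simp only [token_parse, token_parse_alt]
  have hg : ¬ ((String.ofList [s]).length ≠ 1) := by simp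
  rw [if_neg hg]
  have htl : (input ++ String.ofList [s]).toList = input.toList ++ [s] := by simp
  have hsplit? : PySem.Str.split? input (String.ofList [s]) =
      some ((split1 s input.toList []).map String.ofList) := by
    simp [PySem.Str.split?, PySem.Chars.split?, splitOn_single]
  have hjoin : input.toList ++ [s] = (split1 s input.toList []).flatMap (· ++ [s]) := by
    rw [split1_join]; simp
  rw [htl, hjoin, List.foldl_flatMap, fields_sim s eqStr (split1 s input.toList []) hfield]
  simp only [hsplit?]
  generalize ((split1 s input.toList []).map String.ofList).foldl
      (tpFieldStep eqStr) (some (PySem.Dict.empty, [])) = res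
  match res with
  | none => rfl
  | some (d, ta) =>
    simp only [Option.map_some]
    have hstrip : PySem.Str.strip "" = "" := rfl
    simp only [Bool.false_eq_true, if_false, hstrip, ne_eq, not_true_eq_false]
    match ta with
    | [] => simp
    | t :: ta' => simp

-- ===== VERDICT (by name: the statement is the Claim_ definition above) =====
theorem token_parse_spec : Claim_equal_token_parse := by
  unfold Claim_equal_token_parse Spec_token_parse
  intro input separator equator _ hpre
  obtain ⟨hs1, -⟩ := hpre
  obtain ⟨s, hsep⟩ : ∃ s, separator = String.ofList [s] := by
    match hl : separator.toList with
    | [s] => exact ⟨s, by have h2 := congrArg String.ofList hl;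
                          rwa [String.ofList_toList] at h2⟩
    | [] => rw [← String.length_toList, hl] at hs1; simp at hs1
    | a :: b :: l => rw [← String.length_toList, hl] at hs1; simp at hs1
  subst hsep
  have hnomem : ∀ f ∈ split1 s input.toList [], s ∉ f :=
    split1_sep_not_mem s input.toList [] (by simp)
  by_cases he1 : equator.length = 1
  · obtain ⟨e, heq⟩ : ∃ e, equator = String.ofList [e] := by
      match hl : equator.toList with
      | [e] => exact ⟨e, by have h2 := congrArg String.ofList hl;
                            rwa [String.ofList_toList] at h2⟩
      | [] => rw [← String.length_toList, hl] at he1; simp at he1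
      | a :: b :: l => rw [← String.length_toList, hl] at he1; simp at he1
    subst heq
    exact tp_eq_of_field input (String.ofList [e]) s
      (fun f hf => field_sim s e f (hnomem f hf))
  · exact tp_eq_of_field input equator s
      (fun f hf => field_sim3 s equator he1 f (hnomem f hf))
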